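-- pv_equiv track=rewrite | github.com/NiavlySDev/MeteoPolis | SimCity/api.py | conversion_ligne
-- ===== SOURCE A (Python) =====
-- def conversion_ligne(liste):
--     liste2=[]
--
--     for case in liste:
--         temp,tempnb="",""
--         for lettre in case:
--             if lettre in "1234567890":
--                 tempnb+=lettre
--             if lettre in "abcdefghijklmnopqrstuvwxyzABCDEFGHIJKLMNOPQRSTUVWXYZ":
--                 temp+=lettre
--             if lettre == ")":
--                 liste2.append((int(tempnb),temp))
--                 tempnb=""
--                 temp=""
--     return liste2
-- ===== SOURCE B (Python) =====
-- def conversion_ligne(liste):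
--     liste2 = []
--     for case in liste:
--         for part in case.split(')')[:-1]:
--             nombre = ''.join(c for c in part if c in "1234567890")
--             mot = ''.join(c for c in part if c in "abcdefghijklmnopqrstuvwxyzABCDEFGHIJKLMNOPQRSTUVWXYZ")
--             liste2.append((int(nombre), mot))
--     return liste2
-- ===== Notes on version B (the rewrite author's own statement) =====
-- stated objective: faster
-- what changed: Replaces the per-character state machine with string-concatenation accumulators by a split-on-')' then filter decomposition (one C-level split per string, one filter pass per segment).
import Mathlib
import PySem

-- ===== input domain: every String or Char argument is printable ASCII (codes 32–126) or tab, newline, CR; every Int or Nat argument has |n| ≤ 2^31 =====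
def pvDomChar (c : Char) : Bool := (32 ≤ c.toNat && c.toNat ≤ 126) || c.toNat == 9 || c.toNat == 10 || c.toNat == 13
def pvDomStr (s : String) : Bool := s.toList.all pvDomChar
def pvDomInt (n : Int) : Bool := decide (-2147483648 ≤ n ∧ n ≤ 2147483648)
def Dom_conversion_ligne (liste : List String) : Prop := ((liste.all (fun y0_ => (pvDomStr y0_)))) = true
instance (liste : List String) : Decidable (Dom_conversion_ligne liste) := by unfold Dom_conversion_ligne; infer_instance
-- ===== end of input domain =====

-- B replaces A's per-character state machine by a split-on-')'-then-filter decomposition (objective: faster, measured).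

-- ===== PORT A =====
-- Literal port of A: inner char loop with string accumulators temp/tempnb;
-- int(tempnb) raises ValueError when tempnb = "" (excluded by Pre_): the port uses .getD 0 there.
def conversion_ligne (liste : List String) : List (Int × String) :=
  liste.foldl (fun liste2 case =>
    (case.toList.foldl (fun (st : String × String × List (Int × String)) lettre =>
      let temp := st.1
      let tempnb := st.2.1
      let liste2' := st.2.2
      let tempnb := if "1234567890".toList.contains lettre then tempnb.push lettre else tempnb
      let temp := if "abcdefghijklmnopqrstuvwxyzABCDEFGHIJKLMNOPQRSTUVWXYZ".toList.contains lettre then temp.push lettre else temp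
      if lettre = ')' then
        ("", "", liste2' ++ [((PySem.Int.ofStr? tempnb).getD 0, temp)])
      else
        (temp, tempnb, liste2')) ("", "", liste2)).2.2) []

-- ===== PORT B =====
-- Literal port of B: split each case on ')' (PySem split, single-char separator),
-- drop the last segment, filter each kept segment for digits and for letters.
def conversion_ligne_alt (liste : List String) : List (Int × String) :=
  liste.foldl (fun liste2 case =>
    liste2 ++ ((PySem.Chars.splitOn case.toList [')']).dropLast).map (fun part =>
      ((PySem.Int.ofChars? (part.filter (fun c => "1234567890".toList.contains c))).getD 0,
       String.ofList (part.filter (fun c => "abcdefghijklmnopqrstuvwxyzABCDEFGHIJKLMNOPQRSTUVWXYZ".toList.contains c))))) []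

-- ===== PRECONDITION & SPEC =====
-- Pre_ excludes the inputs on which A raises ValueError: a segment before some ')'
-- containing no digit makes A call int("") there (B raises the same way).
def Pre_conversion_ligne (liste : List String) : Prop :=
  (liste.all (fun case =>
    ((PySem.Chars.splitOn case.toList [')']).dropLast).all (fun part =>
      part.any (fun c => "1234567890".toList.contains c)))) = true

instance (liste : List String) : Decidable (Pre_conversion_ligne liste) := by
  unfold Pre_conversion_ligne; infer_instance

def pvWitness_conversion_ligne : List String := ["12ab)3c)", "x7y)"]

def Spec_conversion_ligne (liste : List String) (out : List (Int × String)) : Prop := out = conversion_ligne_alt liste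
instance (liste : List String) (out : List (Int × String)) : Decidable (Spec_conversion_ligne liste out) := by unfold Spec_conversion_ligne; infer_instance

-- ===== CLAIM (what is proved, stated in full; the proofs are below) =====
def Claim_equal_conversion_ligne : Prop := ∀ (liste : List String), Dom_conversion_ligne liste → Pre_conversion_ligne liste → Spec_conversion_ligne liste (conversion_ligne liste)

-- ===== LEMMAS AND PROOFS =====

def isDigC (c : Char) : Bool := "1234567890".toList.contains c
def isLetC (c : Char) : Bool := "abcdefghijklmnopqrstuvwxyzABCDEFGHIJKLMNOPQRSTUVWXYZ".toList.contains c

-- A's inner loop body, named so the proofs can rewrite one step at a time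
def stepA (st : String × String × List (Int × String)) (lettre : Char) : String × String × List (Int × String) :=
  let temp := st.1
  let tempnb := st.2.1
  let liste2' := st.2.2
  let tempnb := if "1234567890".toList.contains lettre then tempnb.push lettre else tempnb
  let temp := if "abcdefghijklmnopqrstuvwxyzABCDEFGHIJKLMNOPQRSTUVWXYZ".toList.contains lettre then temp.push lettre else temp
  if lettre = ')' then
    ("", "", liste2' ++ [((PySem.Int.ofStr? tempnb).getD 0, temp)])
  else
    (temp, tempnb, liste2')

lemma stepA_close (tm nb : String) (acc : List (Int × String)) :
    stepA (tm, nb, acc) ')' = ("", "", acc ++ [((PySem.Int.ofStr? nb).getD 0, tm)]) := by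
  simp [stepA]

lemma stepA_other (tm nb : String) (acc : List (Int × String)) (c : Char) (hc : c ≠ ')') :
    stepA (tm, nb, acc) c
      = (if isLetC c then tm.push c else tm, if isDigC c then nb.push c else nb, acc) := by
  simp [stepA, isDigC, isLetC, hc]

-- structural single-char split
def mySplit : List Char → List (List Char)
  | [] => [[]]
  | c :: t => if c = ')' then [] :: mySplit t else (mySplit t).modifyHead (c :: ·)

-- chars-level version of A's inner loop emissions
def emitsC : List Char → List Char → List Char → List (Int × String)
  | [], _, _ => []
  | c :: t, nb, tm =>
    if c = ')' then ((PySem.Int.ofChars? nb).getD 0, String.ofList tm) :: emitsC t [] []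
    else emitsC t (if isDigC c then nb ++ [c] else nb) (if isLetC c then tm ++ [c] else tm)

def fB (part : List Char) : Int × String :=
  ((PySem.Int.ofChars? (part.filter isDigC)).getD 0, String.ofList (part.filter isLetC))

lemma mySplit_ne_nil (l : List Char) : mySplit l ≠ [] := by
  cases l with
  | nil => simp [mySplit]
  | cons c t =>
    simp only [mySplit]
    split
    · simp
    · cases h : mySplit t with
      | nil => exact absurd h (mySplit_ne_nil t)
      | cons p ps => simp [List.modifyHead]

lemma go_eq (fuel : Nat) (l cur : List Char) (acc : List (List Char))
    (h : l.length < fuel) :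
    PySem.Chars.splitOn.go [')'] fuel l cur acc
      = acc.reverse ++ (mySplit l).modifyHead (cur.reverse ++ ·) := by
  induction fuel generalizing l cur acc with
  | zero => omega
  | succ f ih =>
    cases l with
    | nil =>
      rw [PySem.Chars.splitOn.go.eq_def]
      simp [mySplit]
    | cons c rest =>
      rw [PySem.Chars.splitOn.go.eq_def]
      simp only [List.isPrefixOf, Bool.and_true]
      by_cases hc : c = ')'
      · subst hc
        simp only [beq_self_eq_true, if_pos]
        rw [show List.drop [')'].length (')' :: rest) = rest from rfl]
        rw [ih rest [] (cur.reverse :: acc) (by simpa using Nat.lt_of_succ_lt_succ h)]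
        rcases hp : mySplit rest with _ | ⟨p, ps⟩
        · exact absurd hp (mySplit_ne_nil rest)
        · simp [mySplit, hp, List.modifyHead]
      · have hbeq : (')' == c) = false := by
          simp; exact fun h' => hc h'.symm
        rw [hbeq]
        simp only [Bool.false_eq_true, if_neg, not_false_eq_true]
        rw [ih rest (c :: cur) acc (by simpa using Nat.lt_of_succ_lt_succ h)]
        rcases hp : mySplit rest with _ | ⟨p, ps⟩
        · exact absurd hp (mySplit_ne_nil rest)
        · simp [mySplit, hc, hp, List.modifyHead]

lemma splitOn_eq (cs : List Char) :
    PySem.Chars.splitOn cs [')'] = mySplit cs := by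
  rw [PySem.Chars.splitOn, go_eq (cs.length + 1) cs [] [] (by omega)]
  rcases hp : mySplit cs with _ | ⟨p, ps⟩
  · exact absurd hp (mySplit_ne_nil cs)
  · simp [List.modifyHead]

-- A's inner fold equals acc ++ emitsC
lemma innerA_eq (cs : List Char) (tm nb : String) (acc : List (Int × String)) :
    (cs.foldl stepA (tm, nb, acc)).2.2 = acc ++ emitsC cs nb.toList tm.toList := by
  induction cs generalizing tm nb acc with
  | nil => simp [emitsC]
  | cons c t ih =>
    rw [List.foldl_cons]
    by_cases hc : c = ')'
    · subst hc
      rw [stepA_close, ih, emitsC, if_pos rfl]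
      simp [PySem.Int.ofStr?]
    · rw [stepA_other tm nb acc c hc, ih, emitsC, if_neg hc]
      have e1 : (if isDigC c then nb.push c else nb).toList
          = (if isDigC c then nb.toList ++ [c] else nb.toList) := by split <;> simp
      have e2 : (if isLetC c then tm.push c else tm).toList
          = (if isLetC c then tm.toList ++ [c] else tm.toList) := by split <;> simp
      rw [e1, e2]

-- emitsC equals the split-then-filter form (generalized over carried state)
lemma emits_eq (cs nb tm : List Char) :
    emitsC cs nb tm =
      match mySplit cs with
      | [] => []
      | [_] => []
      | p :: ps =>
        ((PySem.Int.ofChars? (nb ++ p.filter isDigC)).getD 0,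
         String.ofList (tm ++ p.filter isLetC)) :: ps.dropLast.map fB := by
  induction cs generalizing nb tm with
  | nil => simp [emitsC, mySplit]
  | cons c t ih =>
    by_cases hc : c = ')'
    · subst hc
      rw [emitsC, if_pos rfl, ih [] []]
      rcases hq : mySplit t with _ | ⟨q, qs⟩
      · exact absurd hq (mySplit_ne_nil t)
      · rw [show mySplit (')' :: t) = [] :: mySplit t from by simp [mySplit], hq]
        cases qs with
        | nil => simp
        | cons r rs => simp [fB, List.dropLast]
    · rw [emitsC, if_neg hc, ih]
      rcases hq : mySplit t with _ | ⟨q, qs⟩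
      · exact absurd hq (mySplit_ne_nil t)
      · rw [show mySplit (c :: t) = (mySplit t).modifyHead (c :: ·) from by simp [mySplit, hc], hq]
        simp only [List.modifyHead]
        cases qs with
        | nil => rfl
        | cons r rs =>
          have hd : List.filter isDigC (c :: q) = if isDigC c then c :: q.filter isDigC else q.filter isDigC := by
            simp [List.filter_cons]
          have hl : List.filter isLetC (c :: q) = if isLetC c then c :: q.filter isLetC else q.filter isLetC := by
            simp [List.filter_cons]
          simp only [hd, hl]
          split <;> split <;> simp [List.append_assoc]

-- per-case: A's contribution equals B's contribution
lemma case_eq (case : String) (acc : List (Int × String)) :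
    (case.toList.foldl stepA ("", "", acc)).2.2
    = acc ++ ((PySem.Chars.splitOn case.toList [')']).dropLast).map (fun part =>
      ((PySem.Int.ofChars? (part.filter (fun c => "1234567890".toList.contains c))).getD 0,
       String.ofList (part.filter (fun c => "abcdefghijklmnopqrstuvwxyzABCDEFGHIJKLMNOPQRSTUVWXYZ".toList.contains c)))) := by
  rw [innerA_eq, splitOn_eq]
  congr 1
  rw [emits_eq]
  show _ = (mySplit case.toList).dropLast.map fB
  rcases hq : mySplit case.toList with _ | ⟨q, qs⟩
  · simp
  · cases qs with
    | nil => simp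
    | cons r rs => simp [fB, List.dropLast]

lemma ports_eq (liste : List String) :
    conversion_ligne liste = conversion_ligne_alt liste := by
  show liste.foldl (fun liste2 case => (case.toList.foldl stepA ("", "", liste2)).2.2) [] = _
  unfold conversion_ligne_alt
  congr 1
  funext acc case
  exact case_eq case acc

-- ===== VERDICT (by name: the statement is the Claim_ definition above) =====
theorem conversion_ligne_spec : Claim_equal_conversion_ligne := by
  intro liste _ _
  unfold Spec_conversion_ligne
  exact ports_eq liste
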